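-- pv_equiv track=rewrite | github.com/Jsebas1212/AlgoritmiaYProgramacion | Funciones/Ejercicio_2_Lista_Pares_Cuadrado.py | pro_lista
-- ===== SOURCE A (Python) =====
-- def pro_lista(lista):
--     """
--     Esta función lo que haces es recorrer una lista y
--     cada vez que encuentre un número par lo eleva al
--     cuadrado y lo guarda.
--
--     Parámetros:
--     lista (list): Lista de números enteros.
--
--     Retorna:
--     list: una nueva lista que contiene a los números pares de
--     la original pero elevados al cuadrado.
--     """
--     if lista == []:
--         return []
--     else:
--         numero = lista[0]
--         if numero % 2 == 0:
--             return [numero**2] + pro_lista(lista[1:])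
--         else:
--             return pro_lista(lista[1:])
-- ===== SOURCE B (Python) =====
-- def pro_lista(lista):
--     resultado = []
--     for numero in lista:
--         if numero % 2 == 0:
--             resultado.append(numero ** 2)
--     return resultado
-- ===== Notes on version B (the rewrite author's own statement) =====
-- stated objective: faster
-- what changed: Replaces head/tail recursion with list slicing and '+' concatenation by a single iterative forward pass appending to an accumulator.
import Mathlib
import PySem

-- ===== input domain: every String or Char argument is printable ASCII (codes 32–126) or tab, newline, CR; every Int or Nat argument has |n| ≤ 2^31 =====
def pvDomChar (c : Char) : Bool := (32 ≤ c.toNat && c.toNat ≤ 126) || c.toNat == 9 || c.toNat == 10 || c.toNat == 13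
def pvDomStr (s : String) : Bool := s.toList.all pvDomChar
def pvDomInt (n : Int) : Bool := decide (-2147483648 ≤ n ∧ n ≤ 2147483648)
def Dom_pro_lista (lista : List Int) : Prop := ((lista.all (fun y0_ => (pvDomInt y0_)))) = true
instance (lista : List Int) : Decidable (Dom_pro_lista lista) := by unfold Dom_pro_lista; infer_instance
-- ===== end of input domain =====

-- B replaces A's head/tail recursion with slicing by a single iterative accumulator pass (faster on long lists).


-- ===== PORT A =====
-- A: if the list is empty return []; otherwise take the head, and recurse on lista[1:],
-- prepending [head**2] when the head is even (Python's % with positive divisor = PySem.Int.mod).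
def pro_lista (lista : List Int) : List Int :=
  match lista with
  | [] => []
  | numero :: rest =>        -- lista[0] = numero, lista[1:] = rest
    if PySem.Int.mod numero 2 = 0 then
      [numero ^ 2] ++ pro_lista rest
    else
      pro_lista rest

-- ===== PORT B =====
-- B: iterative forward pass appending numero**2 to an accumulator when numero is even.
def pro_lista_alt (lista : List Int) : List Int :=
  lista.foldl (fun resultado numero =>
    if PySem.Int.mod numero 2 = 0 then resultado ++ [numero ^ 2] else resultado) []

-- ===== PRECONDITION & SPEC =====
def Spec_pro_lista (lista : List Int) (out : List Int) : Prop := out = pro_lista_alt lista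
instance (lista : List Int) (out : List Int) : Decidable (Spec_pro_lista lista out) := by unfold Spec_pro_lista; infer_instance

-- ===== CLAIM (what is proved, stated in full; the proofs are below) =====
def Claim_equal_pro_lista : Prop := ∀ (lista : List Int), Dom_pro_lista lista → Spec_pro_lista lista (pro_lista lista)

-- ===== LEMMAS AND PROOFS =====

theorem pro_lista_foldl (lista : List Int) (acc : List Int) :
    lista.foldl (fun resultado numero =>
      if PySem.Int.mod numero 2 = 0 then resultado ++ [numero ^ 2] else resultado) acc
      = acc ++ pro_lista lista := by
  induction lista generalizing acc with
  | nil => simp [pro_lista]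
  | cons n t ih =>
    simp only [List.foldl, pro_lista]
    by_cases h : PySem.Int.mod n 2 = 0
    · rw [if_pos h, if_pos h, ih]; simp
    · rw [if_neg h, if_neg h, ih]

-- ===== VERDICT (by name: the statement is the Claim_ definition above) =====
theorem pro_lista_spec : Claim_equal_pro_lista := by
  intro lista _
  unfold Spec_pro_lista pro_lista_alt
  rw [pro_lista_foldl]
  simp
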